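-- pv_equiv track=rewrite | github.com/priyanshu-arya/DSA | random.py | maximizeDumpling
-- ===== SOURCE A (Python) =====
-- def maximizeDumpling(nums):
--     maximum = max(nums)
--     res = dict.fromkeys(range(0, len(nums) + 1), 0)
--     for i in range(len(nums)):
--         res[nums[i]] += 1
--     result = 0
--     i = maximum
--     while i > 0:
--         if res[i] > 0:
--             result += i
--             res[i - 1] -= 1
--             res[i] -= 1
--         else:
--             i -= 1
--     return result
-- ===== SOURCE B (Python) =====
-- def maximizeDumpling(nums):
--     maximum = max(nums)
--     count = dict.fromkeys(range(0, len(nums) + 1), 0)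
--     for x in nums:
--         count[x] += 1
--     result = 0
--     prev = 0
--     for i in range(maximum, 0, -1):
--         take = count[i] - prev
--         if take < 0:
--             take = 0
--         result += i * take
--         prev = take
--     return result
-- ===== Notes on version B (the rewrite author's own statement) =====
-- stated objective: simpler
-- what changed: Replaces A's index-walking while loop that repeatedly decrements the count dict in place (one iteration per dumpling taken, re-testing res[i]>0 each time) with a single pass over range(maximum,0,-1) carrying one variable prev and applying the closed recurrence take(i)=max(0,count(i)-prev) per level.
import Mathlib
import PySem

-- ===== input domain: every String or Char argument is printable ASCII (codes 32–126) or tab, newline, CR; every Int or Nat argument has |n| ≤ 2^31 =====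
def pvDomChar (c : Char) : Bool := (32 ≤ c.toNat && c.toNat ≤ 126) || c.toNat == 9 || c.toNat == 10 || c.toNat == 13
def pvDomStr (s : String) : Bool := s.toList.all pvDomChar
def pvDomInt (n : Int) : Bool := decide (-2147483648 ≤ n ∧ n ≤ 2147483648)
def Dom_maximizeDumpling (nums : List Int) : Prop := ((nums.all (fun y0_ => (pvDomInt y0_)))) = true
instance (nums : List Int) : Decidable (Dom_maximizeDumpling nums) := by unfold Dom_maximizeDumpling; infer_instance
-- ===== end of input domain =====

-- B replaces A's index-walking while loop that mutates the count dict in place with a single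
-- carry-variable pass over range(maximum, 0, -1) computing take(i) = max(0, count(i) - take(i+1))
-- (objective: simpler).

-- ===== PORT A =====
-- termination helper for the while loop (cited by decreasing_by): a positive pyGetD means the index is in range
theorem pv_pyGetD_pos_lt {xs : List Int} {i : Int} (hi : 0 ≤ i)
    (hv : 0 < PySem.List.pyGetD xs i 0) : i.toNat < xs.length := by
  by_contra h
  have hcast : PySem.List.pyGetD xs ((i.toNat : Nat) : Int) 0 = xs.getD i.toNat 0 :=
    PySem.List.pyGetD_natCast xs i.toNat 0
  rw [Int.toNat_of_nonneg hi] at hcast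
  rw [hcast] at hv
  rw [List.getD_eq_default] at hv
  · exact lt_irrefl 0 hv
  · omega

-- reading a set list: pySetD/pyGetD on nonnegative indices (exact for in- and out-of-range writes)
theorem pv_pyGetD_pySetD (xs : List Int) (a b v d : Int) (ha : 0 ≤ a) (hb : 0 ≤ b) :
    PySem.List.pyGetD (PySem.List.pySetD xs a v) b d
      = if b = a ∧ a.toNat < xs.length then v else PySem.List.pyGetD xs b d := by
  obtain ⟨n, rfl⟩ : ∃ n : Nat, a = (n : Int) := ⟨a.toNat, by omega⟩
  obtain ⟨kk, rfl⟩ : ∃ kk : Nat, b = (kk : Int) := ⟨b.toNat, by omega⟩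
  simp only [PySem.List.pySetD_natCast, PySem.List.pyGetD_natCast, Int.toNat_natCast,
    Nat.cast_inj]
  by_cases hrange : n < xs.length
  · by_cases heq : kk = n
    · subst heq
      simp [List.getD_eq_getElem?_getD, hrange]
    · have hne : n ≠ kk := fun h => heq h.symm
      simp [List.getD_eq_getElem?_getD, List.getElem?_set_ne hne, heq]
  · rw [List.set_eq_of_length_le (by omega)]
    simp [hrange]

-- 'while i > 0: …' of A, with the dict res (keys exactly 0..len(nums)) represented by the list of
-- its values indexed by key — the same values; exact wherever Python's res[i] lookups do not raise
def maximizeDumplingLoop (res : List Int) (i : Int) (result : Int) : Int :=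
  if hi : 0 < i then
    if hv : 0 < PySem.List.pyGetD res i 0 then
      let r1 := PySem.List.pySetD res (i - 1) (PySem.List.pyGetD res (i - 1) 0 - 1)
      let r2 := PySem.List.pySetD r1 i (PySem.List.pyGetD r1 i 0 - 1)
      maximizeDumplingLoop r2 i (result + i)
    else
      maximizeDumplingLoop res (i - 1) result
  else result
termination_by (i.toNat, (PySem.List.pyGetD res i 0).toNat)
decreasing_by
  · apply Prod.Lex.right
    have hget : PySem.List.pyGetD (PySem.List.pySetD res (i-1) (PySem.List.pyGetD res (i-1) 0 - 1)) i 0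
        = PySem.List.pyGetD res i 0 := by
      rw [pv_pyGetD_pySetD res (i-1) i _ 0 (by omega) (by omega)]
      have : ¬ (i = i - 1) := by omega
      simp [this]
    have hr : i.toNat < (PySem.List.pySetD res (i-1) (PySem.List.pyGetD res (i-1) 0 - 1)).length := by
      rw [PySem.List.length_pySetD]
      exact pv_pyGetD_pos_lt (by omega) hv
    rw [pv_pyGetD_pySetD _ i i _ 0 (by omega) (by omega)]
    rw [if_pos ⟨rfl, hr⟩, hget]
    omega
  · apply Prod.Lex.left
    omega

def maximizeDumpling (nums : List Int) : Int :=
  match PySem.List.max? nums (fun y => y) with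
  | none => 0  -- Python max([]) raises ValueError; excluded by Pre_maximizeDumpling
  | some maximum =>
    let res0 : List Int := List.replicate (nums.length + 1) 0
    let res := nums.foldl (fun r x => PySem.List.pySetD r x (PySem.List.pyGetD r x 0 + 1)) res0
    maximizeDumplingLoop res maximum 0

-- ===== PORT B =====
def maximizeDumpling_alt (nums : List Int) : Int :=
  match PySem.List.max? nums (fun y => y) with
  | none => 0  -- Python max([]) raises ValueError; excluded by Pre_maximizeDumpling
  | some maximum =>
    -- count = dict.fromkeys(range(0, len(nums)+1), 0) has keys exactly 0..len(nums); represented,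
    -- like A's res, as the list of its values indexed by key — exact wherever count[...] does not raise
    let count0 : List Int := List.replicate (nums.length + 1) 0
    let count := nums.foldl (fun c x => PySem.List.pySetD c x (PySem.List.pyGetD c x 0 + 1)) count0
    let st := (PySem.List.pyRange maximum 0 (-1)).foldl
      (fun (st : Int × Int) i =>
        let take := PySem.List.pyGetD count i 0 - st.2
        let take := if take < 0 then 0 else take
        (st.1 + i * take, take)) (0, 0)
    st.1

-- ===== PRECONDITION & SPEC =====
-- Pre_ excludes exactly the inputs on which A raises: the empty list (max raises ValueError) and
-- lists containing a value outside 0..len(nums) (res[nums[i]] += 1 raises KeyError).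
def Pre_maximizeDumpling (nums : List Int) : Prop :=
  nums ≠ [] ∧ ∀ x ∈ nums, 0 ≤ x ∧ x ≤ (nums.length : Int)
instance (nums : List Int) : Decidable (Pre_maximizeDumpling nums) := by
  unfold Pre_maximizeDumpling; infer_instance

def pvWitness_maximizeDumpling : List Int := [2, 2, 1, 0]

def Spec_maximizeDumpling (nums : List Int) (out : Int) : Prop := out = maximizeDumpling_alt nums
instance (nums : List Int) (out : Int) : Decidable (Spec_maximizeDumpling nums out) := by
  unfold Spec_maximizeDumpling; infer_instance

-- ===== CLAIM (what is proved, stated in full; the proofs are below) =====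
def Claim_equal_maximizeDumpling : Prop := ∀ (nums : List Int), Dom_maximizeDumpling nums →
  Pre_maximizeDumpling nums → Spec_maximizeDumpling nums (maximizeDumpling nums)

-- ===== LEMMAS AND PROOFS =====

-- writing back the value just read is a no-op
theorem pv_pySetD_self (xs : List Int) (j : Int) (hj : 0 ≤ j) :
    PySem.List.pySetD xs j (PySem.List.pyGetD xs j 0) = xs := by
  obtain ⟨n, rfl⟩ : ∃ n : Nat, j = (n : Int) := ⟨j.toNat, by omega⟩
  simp only [PySem.List.pySetD_natCast, PySem.List.pyGetD_natCast]
  apply List.ext_getElem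
  · simp
  · intro k h1 h2
    rw [List.getElem_set]
    split
    · next heq =>
        subst heq
        rw [List.getD_eq_getElem _ _ (by simpa using h2)]
    · rfl

-- two writes at the same nonnegative index collapse
theorem pv_pySetD_collapse (xs : List Int) (a u w : Int) (ha : 0 ≤ a) :
    PySem.List.pySetD (PySem.List.pySetD xs a u) a w = PySem.List.pySetD xs a w := by
  obtain ⟨n, rfl⟩ : ∃ n : Nat, a = (n : Int) := ⟨a.toNat, by omega⟩
  simp only [PySem.List.pySetD_natCast]
  simp [List.set_set]

-- writes at distinct nonnegative indices commute
theorem pv_pySetD_comm (xs : List Int) (a b u w : Int) (ha : 0 ≤ a) (hb : 0 ≤ b) (hab : a ≠ b) :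
    PySem.List.pySetD (PySem.List.pySetD xs a u) b w
      = PySem.List.pySetD (PySem.List.pySetD xs b w) a u := by
  obtain ⟨n, rfl⟩ : ∃ n : Nat, a = (n : Int) := ⟨a.toNat, by omega⟩
  obtain ⟨kk, rfl⟩ : ∃ kk : Nat, b = (kk : Int) := ⟨b.toNat, by omega⟩
  simp only [PySem.List.pySetD_natCast]
  exact List.set_comm _ _ (by omega)

-- counting pass of A: the list res0 updated once per element holds the element counts
theorem pv_countA (xs : List Int) (init : List Int) (j : Int) (hj : 0 ≤ j)
    (hjr : j.toNat < init.length) (hxs : ∀ x ∈ xs, 0 ≤ x ∧ x.toNat < init.length) :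
    PySem.List.pyGetD
        (xs.foldl (fun r x => PySem.List.pySetD r x (PySem.List.pyGetD r x 0 + 1)) init) j 0
      = PySem.List.pyGetD init j 0 + xs.count j := by
  induction xs generalizing init with
  | nil => simp
  | cons x t ih =>
    have hx := hxs x (List.mem_cons_self)
    have hlen : (PySem.List.pySetD init x (PySem.List.pyGetD init x 0 + 1)).length = init.length :=
      PySem.List.length_pySetD _ _ _
    simp only [List.foldl_cons]
    rw [ih _ (by rw [hlen]; exact hjr)
        (fun y hy => by rw [hlen]; exact hxs y (List.mem_cons_of_mem x hy))]
    rw [pv_pyGetD_pySetD init x j _ 0 hx.1 hj]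
    rw [List.count_cons]
    by_cases heq : j = x
    · subst heq
      simp [hx.2]
      omega
    · have : ¬ (x = j) := fun h => heq h.symm
      simp [heq, this]

theorem pv_replicate_get (n : Nat) (j : Int) (hj : 0 ≤ j) :
    PySem.List.pyGetD (List.replicate n (0 : Int)) j 0 = 0 := by
  have hcast : PySem.List.pyGetD (List.replicate n (0 : Int)) ((j.toNat : Nat) : Int) 0
      = (List.replicate n (0 : Int)).getD j.toNat 0 := PySem.List.pyGetD_natCast _ j.toNat 0
  rw [Int.toNat_of_nonneg hj] at hcast
  rw [hcast]
  rcases Nat.lt_or_ge j.toNat n with h | h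
  · rw [List.getD_eq_getElem _ _ (by simpa using h)]
    simp
  · rw [List.getD_eq_default _ _ (by simpa using h)]

theorem pv_foldl_count_length (xs : List Int) (init : List Int) :
    (xs.foldl (fun r x => PySem.List.pySetD r x (PySem.List.pyGetD r x 0 + 1)) init).length
      = init.length := by
  induction xs generalizing init with
  | nil => rfl
  | cons x t ih => rw [List.foldl_cons, ih, PySem.List.length_pySetD]

-- the B-side step function, with the count lookup replaced by List.count
def pvStep (nums : List Int) (st : Int × Int) (i : Int) : Int × Int :=
  (st.1 + i * (if (nums.count i : Int) - st.2 < 0 then 0 else (nums.count i : Int) - st.2),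
   if (nums.count i : Int) - st.2 < 0 then 0 else (nums.count i : Int) - st.2)

theorem pv_foldl_congr {α β : Type} (l : List α) (f g : β → α → β) (init : β)
    (h : ∀ b a, a ∈ l → f b a = g b a) : l.foldl f init = l.foldl g init := by
  induction l generalizing init with
  | nil => rfl
  | cons x t ih =>
    rw [List.foldl_cons, List.foldl_cons, h init x List.mem_cons_self]
    exact ih _ (fun b a ha => h b a (List.mem_cons_of_mem x ha))

-- inner unrolling of A's while loop: all takes at one level i, in closed form
theorem pv_inner (m : Nat) : ∀ (i : Int) (res : List Int) (acc : Int),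
    0 < i → (i - 1).toNat < res.length → PySem.List.pyGetD res i 0 ≤ (m : Int) →
    maximizeDumplingLoop res i acc =
      maximizeDumplingLoop
        (PySem.List.pySetD
          (PySem.List.pySetD res (i - 1)
            (PySem.List.pyGetD res (i - 1) 0 - max 0 (PySem.List.pyGetD res i 0)))
          i (PySem.List.pyGetD res i 0 - max 0 (PySem.List.pyGetD res i 0)))
        (i - 1) (acc + i * max 0 (PySem.List.pyGetD res i 0)) := by
  induction m with
  | zero =>
    intro i res acc hi hlo hle
    have hmax : max 0 (PySem.List.pyGetD res i 0) = 0 := by omega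
    rw [hmax]
    simp only [sub_zero, mul_zero, add_zero]
    rw [pv_pySetD_self res (i-1) (by omega), pv_pySetD_self res i (by omega)]
    rw [maximizeDumplingLoop, dif_pos hi, dif_neg (by omega)]
  | succ m ih =>
    intro i res acc hi hlo hle
    by_cases hv : 0 < PySem.List.pyGetD res i 0
    · have hiR : i.toNat < res.length := pv_pyGetD_pos_lt (by omega) hv
      have hne : ¬ (i = i - 1) := by omega
      have hr1i : PySem.List.pyGetD
          (PySem.List.pySetD res (i-1) (PySem.List.pyGetD res (i-1) 0 - 1)) i 0
          = PySem.List.pyGetD res i 0 := by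
        rw [pv_pyGetD_pySetD res (i-1) i _ 0 (by omega) (by omega)]
        simp [hne]
      rw [maximizeDumplingLoop, dif_pos hi, dif_pos hv]
      simp only [hr1i]
      have hr2i : PySem.List.pyGetD
          (PySem.List.pySetD (PySem.List.pySetD res (i-1) (PySem.List.pyGetD res (i-1) 0 - 1)) i
            (PySem.List.pyGetD res i 0 - 1)) i 0 = PySem.List.pyGetD res i 0 - 1 := by
        rw [pv_pyGetD_pySetD _ i i _ 0 (by omega) (by omega)]
        rw [if_pos ⟨rfl, by rw [PySem.List.length_pySetD]; exact hiR⟩]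
      have hr2lo : PySem.List.pyGetD
          (PySem.List.pySetD (PySem.List.pySetD res (i-1) (PySem.List.pyGetD res (i-1) 0 - 1)) i
            (PySem.List.pyGetD res i 0 - 1)) (i-1) 0 = PySem.List.pyGetD res (i-1) 0 - 1 := by
        rw [pv_pyGetD_pySetD _ i (i-1) _ 0 (by omega) (by omega)]
        rw [if_neg (by simp)]
        rw [pv_pyGetD_pySetD res (i-1) (i-1) _ 0 (by omega) (by omega)]
        rw [if_pos ⟨rfl, hlo⟩]
      rw [ih i
          (PySem.List.pySetD (PySem.List.pySetD res (i-1) (PySem.List.pyGetD res (i-1) 0 - 1)) i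
            (PySem.List.pyGetD res i 0 - 1)) (acc + i) hi
          (by rw [PySem.List.length_pySetD, PySem.List.length_pySetD]; exact hlo)
          (by rw [hr2i]; push_cast at hle ⊢; omega)]
      rw [hr2i, hr2lo]
      have hm1 : max 0 (PySem.List.pyGetD res i 0 - 1) = PySem.List.pyGetD res i 0 - 1 := by omega
      have hm0 : max 0 (PySem.List.pyGetD res i 0) = PySem.List.pyGetD res i 0 := by omega
      rw [hm1, hm0]
      have e1 : PySem.List.pyGetD res (i-1) 0 - 1 - (PySem.List.pyGetD res i 0 - 1)
          = PySem.List.pyGetD res (i-1) 0 - PySem.List.pyGetD res i 0 := by ring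
      have e2 : PySem.List.pyGetD res i 0 - 1 - (PySem.List.pyGetD res i 0 - 1)
          = PySem.List.pyGetD res i 0 - PySem.List.pyGetD res i 0 := by ring
      rw [e1, e2]
      have hsets : PySem.List.pySetD
          (PySem.List.pySetD
            (PySem.List.pySetD (PySem.List.pySetD res (i-1) (PySem.List.pyGetD res (i-1) 0 - 1)) i
              (PySem.List.pyGetD res i 0 - 1)) (i-1)
            (PySem.List.pyGetD res (i-1) 0 - PySem.List.pyGetD res i 0)) i
          (PySem.List.pyGetD res i 0 - PySem.List.pyGetD res i 0)
          = PySem.List.pySetD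
            (PySem.List.pySetD res (i-1)
              (PySem.List.pyGetD res (i-1) 0 - PySem.List.pyGetD res i 0)) i
            (PySem.List.pyGetD res i 0 - PySem.List.pyGetD res i 0) := by
        rw [pv_pySetD_comm
            (PySem.List.pySetD res (i-1) (PySem.List.pyGetD res (i-1) 0 - 1)) i (i-1)
            (PySem.List.pyGetD res i 0 - 1)
            (PySem.List.pyGetD res (i-1) 0 - PySem.List.pyGetD res i 0)
            (by omega) (by omega) (by omega)]
        rw [pv_pySetD_collapse res (i-1) (PySem.List.pyGetD res (i-1) 0 - 1)
            (PySem.List.pyGetD res (i-1) 0 - PySem.List.pyGetD res i 0) (by omega)]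
        rw [pv_pySetD_collapse _ i (PySem.List.pyGetD res i 0 - 1)
            (PySem.List.pyGetD res i 0 - PySem.List.pyGetD res i 0) (by omega)]
      rw [hsets]
      have eacc : acc + i + i * (PySem.List.pyGetD res i 0 - 1)
          = acc + i * PySem.List.pyGetD res i 0 := by ring
      rw [eacc]
    · have hmax : max 0 (PySem.List.pyGetD res i 0) = 0 := by omega
      rw [hmax]
      simp only [sub_zero, mul_zero, add_zero]
      rw [pv_pySetD_self res (i-1) (by omega), pv_pySetD_self res i (by omega)]
      rw [maximizeDumplingLoop, dif_pos hi, dif_neg (by omega)]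

-- main loop correspondence: A's while loop equals B's carry fold, under the count invariant
theorem pv_main (nums : List Int) (k : Nat) : ∀ (i : Int) (res : List Int) (prev acc : Int),
    i.toNat = k → 0 ≤ i → i ≤ (nums.length : Int) → res.length = nums.length + 1 →
    (∀ j : Int, 1 ≤ j → j ≤ i →
      PySem.List.pyGetD res j 0 = (nums.count j : Int) - (if j = i then prev else 0)) →
    maximizeDumplingLoop res i acc =
      ((PySem.List.pyRange i 0 (-1)).foldl (pvStep nums) (acc, prev)).1 := by
  induction k using Nat.strong_induction_on with
  | _ k IH =>
    intro i res prev acc hk h0 hn hlen H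
    rcases eq_or_lt_of_le h0 with hz | hpos
    · rw [← hz]
      rw [PySem.List.pyRange_neg_one_eq_nil le_rfl]
      rw [maximizeDumplingLoop, dif_neg (by omega)]
      rfl
    · have hv : PySem.List.pyGetD res i 0 = (nums.count i : Int) - prev := by
        have := H i (by omega) le_rfl
        simpa using this
      have hiR : i.toNat < res.length := by omega
      have hloR : (i - 1).toNat < res.length := by omega
      rw [pv_inner (PySem.List.pyGetD res i 0).toNat i res acc hpos hloR (Int.self_le_toNat _)]
      rw [PySem.List.pyRange_neg_one_cons hpos, List.foldl_cons]
      have hstep : pvStep nums (acc, prev) i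
          = (acc + i * max 0 (PySem.List.pyGetD res i 0), max 0 (PySem.List.pyGetD res i 0)) := by
        simp only [pvStep, hv]
        split_ifs with h
        · have h2 : max 0 ((nums.count i : Int) - prev) = 0 := by omega
          rw [h2]
        · have h2 : max 0 ((nums.count i : Int) - prev) = (nums.count i : Int) - prev := by omega
          rw [h2]
      rw [hstep]
      have hlen' : (PySem.List.pySetD
          (PySem.List.pySetD res (i - 1)
            (PySem.List.pyGetD res (i - 1) 0 - max 0 (PySem.List.pyGetD res i 0)))
          i (PySem.List.pyGetD res i 0 - max 0 (PySem.List.pyGetD res i 0))).length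
          = nums.length + 1 := by
        rw [PySem.List.length_pySetD, PySem.List.length_pySetD]
        exact hlen
      have H' : ∀ j : Int, 1 ≤ j → j ≤ i - 1 →
          PySem.List.pyGetD (PySem.List.pySetD
            (PySem.List.pySetD res (i - 1)
              (PySem.List.pyGetD res (i - 1) 0 - max 0 (PySem.List.pyGetD res i 0)))
            i (PySem.List.pyGetD res i 0 - max 0 (PySem.List.pyGetD res i 0))) j 0
          = (nums.count j : Int)
            - (if j = i - 1 then max 0 (PySem.List.pyGetD res i 0) else 0) := by
        intro j hj1 hj2
        have hjne : ¬ (j = i) := by omega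
        rw [pv_pyGetD_pySetD _ i j _ 0 (by omega) (by omega), if_neg (by simp [hjne])]
        rw [pv_pyGetD_pySetD res (i-1) j _ 0 (by omega) (by omega)]
        by_cases hji : j = i - 1
        · subst hji
          rw [if_pos ⟨rfl, hloR⟩]
          have hc1 : PySem.List.pyGetD res (i-1) 0 = (nums.count (i-1) : Int) := by
            have hb := H (i-1) (by omega) (by omega)
            rw [hb, if_neg (by omega)]
            ring
          rw [hc1, if_pos rfl]
        · rw [if_neg (by simp [hji])]
          have hb := H j hj1 (by omega)
          rw [hb, if_neg hjne, if_neg hji]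
      exact IH (i-1).toNat (by omega) (i-1) _ (max 0 (PySem.List.pyGetD res i 0))
        (acc + i * max 0 (PySem.List.pyGetD res i 0)) rfl (by omega) (by omega) hlen' H'

-- ===== VERDICT (by name: the statement is the Claim_ definition above) =====
theorem maximizeDumpling_spec : Claim_equal_maximizeDumpling := by
  intro nums _ hpre
  rcases hpre with ⟨hne, hall⟩
  unfold Spec_maximizeDumpling maximizeDumpling maximizeDumpling_alt
  cases hmax : PySem.List.max? nums (fun y => y) with
  | none => exact absurd ((PySem.List.max?_eq_none_iff nums (fun y => y)).mp hmax) hne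
  | some m =>
    have hmem := PySem.List.max?_mem hmax
    obtain ⟨hm0, hmn⟩ := hall m hmem
    have hcnt : ∀ j : Int, 0 ≤ j → j ≤ (nums.length : Int) →
        PySem.List.pyGetD
          (nums.foldl (fun r x => PySem.List.pySetD r x (PySem.List.pyGetD r x 0 + 1))
            (List.replicate (nums.length + 1) 0)) j 0 = (nums.count j : Int) := by
      intro j hj0 hjn
      have hjr : j.toNat < (List.replicate (nums.length + 1) (0:Int)).length := by
        simp
        omega
      have hbound : ∀ x ∈ nums, 0 ≤ x ∧ x.toNat < (List.replicate (nums.length + 1) (0:Int)).length := by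
        intro x hx
        refine ⟨(hall x hx).1, ?_⟩
        have h1 := (hall x hx).1
        have h2 := (hall x hx).2
        simp
        omega
      rw [pv_countA nums (List.replicate (nums.length + 1) (0:Int)) j hj0 hjr hbound,
        pv_replicate_get (nums.length + 1) j hj0]
      ring
    show maximizeDumplingLoop
        (nums.foldl (fun r x => PySem.List.pySetD r x (PySem.List.pyGetD r x 0 + 1))
          (List.replicate (nums.length + 1) 0)) m 0
      = ((PySem.List.pyRange m 0 (-1)).foldl
          (fun (st : Int × Int) i =>
            (st.1 + i * (if PySem.List.pyGetD
                  (nums.foldl (fun c x => PySem.List.pySetD c x (PySem.List.pyGetD c x 0 + 1))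
                    (List.replicate (nums.length + 1) 0)) i 0 - st.2 < 0 then 0
                else PySem.List.pyGetD
                  (nums.foldl (fun c x => PySem.List.pySetD c x (PySem.List.pyGetD c x 0 + 1))
                    (List.replicate (nums.length + 1) 0)) i 0 - st.2),
              if PySem.List.pyGetD
                  (nums.foldl (fun c x => PySem.List.pySetD c x (PySem.List.pyGetD c x 0 + 1))
                    (List.replicate (nums.length + 1) 0)) i 0 - st.2 < 0 then 0
                else PySem.List.pyGetD
                  (nums.foldl (fun c x => PySem.List.pySetD c x (PySem.List.pyGetD c x 0 + 1))
                    (List.replicate (nums.length + 1) 0)) i 0 - st.2)) (0, 0)).1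
    have H0 : ∀ j : Int, 1 ≤ j → j ≤ m →
        PySem.List.pyGetD
          (nums.foldl (fun r x => PySem.List.pySetD r x (PySem.List.pyGetD r x 0 + 1))
            (List.replicate (nums.length + 1) 0)) j 0
        = (nums.count j : Int) - (if j = m then (0:Int) else 0) := by
      intro j hj1 hj2
      rw [hcnt j (by omega) (by omega)]
      have hz : (if j = m then (0:Int) else 0) = 0 := by split <;> rfl
      rw [hz]
      ring
    rw [pv_main nums m.toNat m _ 0 0 rfl hm0 hmn
        (by rw [pv_foldl_count_length]; simp) H0]
    have hfold := pv_foldl_congr (PySem.List.pyRange m 0 (-1))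
      (fun (st : Int × Int) i =>
        (st.1 + i * (if PySem.List.pyGetD
              (nums.foldl (fun c x => PySem.List.pySetD c x (PySem.List.pyGetD c x 0 + 1))
                (List.replicate (nums.length + 1) 0)) i 0 - st.2 < 0 then 0
            else PySem.List.pyGetD
              (nums.foldl (fun c x => PySem.List.pySetD c x (PySem.List.pyGetD c x 0 + 1))
                (List.replicate (nums.length + 1) 0)) i 0 - st.2),
          if PySem.List.pyGetD
              (nums.foldl (fun c x => PySem.List.pySetD c x (PySem.List.pyGetD c x 0 + 1))
                (List.replicate (nums.length + 1) 0)) i 0 - st.2 < 0 then 0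
            else PySem.List.pyGetD
              (nums.foldl (fun c x => PySem.List.pySetD c x (PySem.List.pyGetD c x 0 + 1))
                (List.replicate (nums.length + 1) 0)) i 0 - st.2))
      (pvStep nums) ((0:Int), (0:Int)) ?_
    · rw [hfold]
    · intro st i hi
      have hmi := (PySem.List.mem_pyRange_neg_one).mp hi
      simp only [pvStep]
      rw [hcnt i (by omega) (by omega)]
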